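-- pv_equiv track=rewrite | github.com/Louise-X10/delta-debugging | mods.py | apply_insert
-- ===== SOURCE A (Python) =====
-- def apply_insert(deltas, inserted):
--     for insert_idx, chars in inserted:
--         # Find the index in new_deltas where to insert
--         for i, (idx, _) in enumerate(deltas):
--             if idx == insert_idx:
--                 for char in chars:
--                     deltas.insert(i + 1, (None, char))  # Use None as a placeholder index
--                 break
--     return deltas
-- ===== SOURCE B (Python) =====
-- def apply_insert(deltas, inserted):
--     # Group all inserted chars by index once (per-index reversed concatenation,
--     # matching repeated insert-at-i+1), then expand deltas in a single pass,
--     # consuming each index at its first occurrence.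
--     pending = {}
--     for insert_idx, chars in inserted:
--         pending[insert_idx] = [c for c in reversed(chars)] + pending.get(insert_idx, [])
--     out = []
--     for idx, s in deltas:
--         out.append((idx, s))
--         if idx is not None and idx in pending:
--             out.extend((None, c) for c in pending.pop(idx))
--     return out
-- ===== Notes on version B (the rewrite author's own statement) =====
-- stated objective: faster
-- what changed: Instead of re-scanning deltas and doing a mid-list insert per inserted char, B groups all inserted chars by index into a dict once (reversed per-index concatenation matching A's repeated insert-at-i+1) and builds the result in a single pass over deltas, consuming each index at its first occurrence.
import Mathlib
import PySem

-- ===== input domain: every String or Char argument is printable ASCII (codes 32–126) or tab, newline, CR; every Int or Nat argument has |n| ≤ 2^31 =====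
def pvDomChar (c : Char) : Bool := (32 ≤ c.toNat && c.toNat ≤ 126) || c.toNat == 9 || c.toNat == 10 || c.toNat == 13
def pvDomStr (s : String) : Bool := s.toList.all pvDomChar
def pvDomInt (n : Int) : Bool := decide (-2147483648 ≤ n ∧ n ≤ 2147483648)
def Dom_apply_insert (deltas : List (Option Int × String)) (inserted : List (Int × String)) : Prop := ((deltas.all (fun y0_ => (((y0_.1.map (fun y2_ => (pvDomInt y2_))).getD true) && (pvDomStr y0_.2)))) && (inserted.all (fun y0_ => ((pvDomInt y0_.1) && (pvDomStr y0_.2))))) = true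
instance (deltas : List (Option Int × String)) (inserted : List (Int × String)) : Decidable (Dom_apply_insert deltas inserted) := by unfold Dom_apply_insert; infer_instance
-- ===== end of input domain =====

-- B groups the inserted chars by index once and expands deltas in a single pass
-- (asymptotically faster than A's repeated scans and mid-list inserts); A mutates
-- `deltas` in place and returns it, B builds a fresh list — the equivalence proved
-- here is about the RETURN value only.

-- ===== PORT A =====
-- inner 'for i, (idx, _) in enumerate(deltas): if idx == insert_idx: … break':
-- index of the first matching element
def pvFindA (k : Int) : List (Option Int × String) → Option Nat
  | [] => none
  | (idx, _) :: t => if idx = some k then some 0 else (pvFindA k t).map (· + 1)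

-- one iteration of A's outer loop: locate the match, then insert each char at i+1
def pvStepA (ds : List (Option Int × String)) (p : Int × String) : List (Option Int × String) :=
  match pvFindA p.1 ds with
  | none => ds
  | some i => p.2.toList.foldl
      (fun acc c => PySem.List.insert acc ((i : Int) + 1) ((none : Option Int), String.ofList [c])) ds

def apply_insert (deltas : List (Option Int × String)) (inserted : List (Int × String)) : List (Option Int × String) :=
  inserted.foldl pvStepA deltas

-- ===== PORT B =====
def apply_insert_alt (deltas : List (Option Int × String)) (inserted : List (Int × String)) : List (Option Int × String) :=
  -- pending[idx] = reversed(chars) + pending.get(idx, [])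
  let pending : PySem.Dict Int (List Char) :=
    inserted.foldl (fun d p => d.insert p.1 (p.2.toList.reverse ++ d.getD p.1 [])) PySem.Dict.empty
  -- single pass over deltas, consuming each index at its first occurrence
  (deltas.foldl
    (fun (st : PySem.Dict Int (List Char) × List (Option Int × String)) e =>
      let out := st.2 ++ [e]
      match e.1 with
      | none => (st.1, out)
      | some k =>
          if st.1.contains k then
            (st.1.erase k, out ++ (st.1.getD k []).map (fun c => ((none : Option Int), String.ofList [c])))
          else (st.1, out))
    (pending, [])).2

-- ===== PRECONDITION & SPEC =====
def Spec_apply_insert (deltas : List (Option Int × String)) (inserted : List (Int × String)) (out : List (Option Int × String)) : Prop := out = apply_insert_alt deltas inserted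
instance (deltas : List (Option Int × String)) (inserted : List (Int × String)) (out : List (Option Int × String)) : Decidable (Spec_apply_insert deltas inserted out) := by unfold Spec_apply_insert; infer_instance

-- ===== CLAIM (what is proved, stated in full; the proofs are below) =====
def Claim_equal_apply_insert : Prop := ∀ (deltas : List (Option Int × String)) (inserted : List (Int × String)), Dom_apply_insert deltas inserted → Spec_apply_insert deltas inserted (apply_insert deltas inserted)

-- ===== LEMMAS AND PROOFS =====

-- placeholder entries for a list of chars
def pvPh (l : List Char) : List (Option Int × String) :=
  l.map (fun c => ((none : Option Int), String.ofList [c]))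

-- canonical result: expand each first occurrence of a key by m, erasing the key
def pvExpand : List (Option Int × String) → (Int → List Char) → List (Option Int × String)
  | [], _ => []
  | (none, s) :: t, m => (none, s) :: pvExpand t m
  | (some k, s) :: t, m =>
      (some k, s) :: (pvPh (m k) ++ pvExpand t (fun j => if j = k then [] else m j))

-- accumulated pending map: reversed chars, later entries in front of nothing? (prepended)
def pvPend : List (Int × String) → (Int → List Char) → (Int → List Char)
  | [], m => m
  | p :: t, m => pvPend t (fun j => if j = p.1 then p.2.toList.reverse ++ m j else m j)

theorem pvExpand_const_nil (ds : List (Option Int × String)) : pvExpand ds (fun _ => []) = ds := by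
  induction ds with
  | nil => rfl
  | cons x t ih =>
      obtain ⟨o, s⟩ := x
      cases o with
      | none => simp [pvExpand, ih]
      | some k =>
          have : (fun j => if j = k then ([] : List Char) else []) = (fun _ => ([] : List Char)) := by
            funext j; split <;> rfl
          simp [pvExpand, pvPh, this, ih]

theorem pvFindA_lt {k : Int} {ds : List (Option Int × String)} {i : Nat}
    (h : pvFindA k ds = some i) : i < ds.length := by
  induction ds generalizing i with
  | nil => simp [pvFindA] at h
  | cons x t ih =>
      obtain ⟨o, s⟩ := x
      by_cases ho : o = some k
      · simp only [pvFindA, if_pos ho] at h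
        obtain rfl : (0 : Nat) = i := by injection h
        simp
      · simp only [pvFindA, if_neg ho, Option.map_eq_some_iff] at h
        obtain ⟨j, hj, rfl⟩ := h
        have hlt := ih hj
        simp only [List.length_cons]; omega

theorem pvInsert_cons_succ {α : Type} (x : α) (xs : List α) (n : Nat) (v : α)
    (h : n ≤ xs.length) :
    PySem.List.insert (x :: xs) ((n : Int) + 1) v = x :: PySem.List.insert xs (n : Int) v := by
  have h1 : ((n : Int) + 1) = ((n + 1 : Nat) : Int) := by push_cast; ring
  rw [h1, PySem.List.insert_natCast _ _ _ (by simp; omega),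
      PySem.List.insert_natCast _ _ _ h]
  simp

theorem pvFoldl_insert_cons (cs : List Char) (x : Option Int × String)
    (xs : List (Option Int × String)) (n : Nat) (h : n ≤ xs.length) :
    cs.foldl (fun acc c => PySem.List.insert acc ((n : Int) + 1) ((none : Option Int), String.ofList [c])) (x :: xs)
      = x :: cs.foldl (fun acc c => PySem.List.insert acc (n : Int) ((none : Option Int), String.ofList [c])) xs := by
  induction cs generalizing xs with
  | nil => rfl
  | cons c cs ih =>
      simp only [List.foldl_cons]
      rw [pvInsert_cons_succ _ _ _ _ h]
      exact ih _ (by rw [PySem.List.insert_natCast _ _ _ h]; simp; omega)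

theorem pvFoldl_cons (cs : List Char) (xs : List (Option Int × String)) :
    cs.foldl (fun acc c => ((none : Option Int), String.ofList [c]) :: acc) xs
      = pvPh cs.reverse ++ xs := by
  induction cs generalizing xs with
  | nil => simp [pvPh]
  | cons c cs ih =>
      simp only [List.foldl_cons]
      rw [ih]
      simp [pvPh]

theorem pvFoldl_insert_zero (cs : List Char) (xs : List (Option Int × String)) :
    cs.foldl (fun acc c => PySem.List.insert acc ((0 : Nat) : Int) ((none : Option Int), String.ofList [c])) xs
      = pvPh cs.reverse ++ xs := by
  simp only [Int.natCast_zero, PySem.List.insert_zero]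
  exact pvFoldl_cons cs xs

-- A's step skips a non-matching head
theorem pvStepA_cons_miss (o : Option Int) (s : String) (t : List (Option Int × String))
    (p : Int × String) (ho : o ≠ some p.1) :
    pvStepA ((o, s) :: t) p = (o, s) :: pvStepA t p := by
  unfold pvStepA
  rw [show pvFindA p.1 ((o, s) :: t) = (pvFindA p.1 t).map (· + 1) from by
    simp [pvFindA, ho]]
  cases hf : pvFindA p.1 t with
  | none => simp [hf]
  | some i =>
      have hi := pvFindA_lt hf
      simp only [hf, Option.map_some]
      have hstep := pvFoldl_insert_cons p.2.toList (o, s) t (i + 1) (by omega)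
      have hcast : (((i + 1 : Nat) : Int)) = (i : Int) + 1 := by push_cast; ring
      rw [hcast] at hstep
      exact hstep

-- A's step expands a matching head (reversed chars directly after it)
theorem pvStepA_cons_hit (k : Int) (s : String) (t : List (Option Int × String)) (cs : String) :
    pvStepA ((some k, s) :: t) (k, cs) = (some k, s) :: (pvPh cs.toList.reverse ++ t) := by
  have hlhs : pvStepA ((some k, s) :: t) (k, cs)
      = cs.toList.foldl (fun acc c => PySem.List.insert acc (((0 : Nat) : Int) + 1)
          ((none : Option Int), String.ofList [c])) ((some k, s) :: t) := by
    unfold pvStepA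
    rw [show pvFindA k ((some k, s) :: t) = some 0 from by simp [pvFindA]]
  rw [hlhs, pvFoldl_insert_cons cs.toList (some k, s) t 0 (by omega), pvFoldl_insert_zero]

theorem pvStepA_ph_append (l : List Char) (rest : List (Option Int × String)) (p : Int × String) :
    pvStepA (pvPh l ++ rest) p = pvPh l ++ pvStepA rest p := by
  induction l with
  | nil => rfl
  | cons c l ih =>
      rw [show pvPh (c :: l) ++ rest
            = ((none : Option Int), String.ofList [c]) :: (pvPh l ++ rest) from by simp [pvPh]]
      rw [pvStepA_cons_miss none (String.ofList [c]) (pvPh l ++ rest) p (by simp), ih]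
      simp [pvPh]

theorem pvStepA_expand (ds : List (Option Int × String)) (m : Int → List Char) (p : Int × String) :
    pvStepA (pvExpand ds m) p
      = pvExpand ds (fun j => if j = p.1 then p.2.toList.reverse ++ m j else m j) := by
  obtain ⟨pk, pcs⟩ := p
  induction ds generalizing m with
  | nil => rfl
  | cons x t ih =>
      obtain ⟨o, s⟩ := x
      cases o with
      | none =>
          simp only [pvExpand]
          rw [pvStepA_cons_miss none s (pvExpand t m) (pk, pcs) (by simp), ih]
      | some k =>
          by_cases hk : k = pk
          · subst hk
            simp only [pvExpand]
            rw [pvStepA_cons_hit]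
            have hm : (fun j => if j = k then ([] : List Char)
                else if j = (k, pcs).1 then (k, pcs).2.toList.reverse ++ m j else m j)
                = (fun j => if j = k then ([] : List Char) else m j) := by
              funext j; by_cases hj : j = k <;> simp [hj]
            simp only [hm]
            simp [pvPh, List.map_append]
          · simp only [pvExpand]
            rw [pvStepA_cons_miss (some k) s _ (pk, pcs) (by simpa using hk),
                pvStepA_ph_append, ih]
            have hmj : (if k = pk then pcs.toList.reverse ++ m k else m k) = m k := by
              simp [hk]
            have hpk : ¬ pk = k := fun h => hk h.symm
            have hswap : (fun j => if j = (pk, pcs).1 then (pk, pcs).2.toList.reverse ++ (fun i => if i = k then [] else m i) j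
                  else (fun i => if i = k then [] else m i) j)
                = (fun j => if j = k then ([] : List Char)
                  else if j = (pk, pcs).1 then (pk, pcs).2.toList.reverse ++ m j else m j) := by
              funext j
              by_cases h1 : j = k
              · subst h1; simp [hk]
              · by_cases h2 : j = pk <;> simp [h1, h2, hpk]
            simp only [hswap, hmj]

theorem pvFoldA_expand (ins : List (Int × String)) (ds : List (Option Int × String))
    (m : Int → List Char) :
    ins.foldl pvStepA (pvExpand ds m) = pvExpand ds (pvPend ins m) := by
  induction ins generalizing m with
  | nil => rfl
  | cons p t ih =>
      simp only [List.foldl_cons, pvPend]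
      rw [pvStepA_expand, ih]

theorem apply_insert_eq_expand (ds : List (Option Int × String)) (ins : List (Int × String)) :
    apply_insert ds ins = pvExpand ds (pvPend ins (fun _ => [])) := by
  unfold apply_insert
  conv_lhs => rw [← pvExpand_const_nil ds]
  rw [pvFoldA_expand]

-- ===== B side =====

theorem pvFind_filter_ne (t : List (Int × List Char)) (k j : Int) :
    List.find? (fun p => p.1 == j) (t.filter (fun p => !(p.1 == k)))
      = if j = k then none else List.find? (fun p => p.1 == j) t := by
  induction t with
  | nil => by_cases h : j = k <;> simp [h]
  | cons x t ih =>
      obtain ⟨a, v⟩ := x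
      by_cases hak : a = k
      · have hdrop : (((a, v) :: t).filter (fun p => !(p.1 == k))) = t.filter (fun p => !(p.1 == k)) := by
          simp [List.filter_cons, hak]
        rw [hdrop, ih]
        by_cases hj : j = k
        · simp [hj]
        · have h3 : (a == j) = false := by
            rw [beq_eq_false_iff_ne, hak]; exact fun h => hj h.symm
          simp [hj, List.find?_cons, h3]
      · have hkeep : (((a, v) :: t).filter (fun p => !(p.1 == k))) = (a, v) :: t.filter (fun p => !(p.1 == k)) := by
          simp [List.filter_cons, hak]
        rw [hkeep]
        by_cases hja : j = a
        · subst hja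
          have hne : ¬ j = k := hak
          simp [List.find?_cons, hne]
        · have h2 : (a == j) = false := by
            rw [beq_eq_false_iff_ne]; exact fun h => hja h.symm
          simp [List.find?_cons, h2, ih]

theorem pvDict_get?_erase (d : PySem.Dict Int (List Char)) (k j : Int) :
    (d.erase k).get? j = if j = k then none else d.get? j := by
  obtain ⟨items⟩ := d
  simp only [PySem.Dict.erase, PySem.Dict.get?]
  rw [pvFind_filter_ne]
  by_cases h : j = k <;> simp [h]

theorem pvDict_getD_erase (d : PySem.Dict Int (List Char)) (k j : Int) :
    (d.erase k).getD j [] = if j = k then [] else d.getD j [] := by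
  simp only [PySem.Dict.getD, pvDict_get?_erase]
  by_cases h : j = k <;> simp [h]

-- the built dict agrees with pvPend
theorem pvPendDict_agree (ins : List (Int × String)) (d : PySem.Dict Int (List Char))
    (m : Int → List Char) (h : ∀ k, d.getD k [] = m k) :
    ∀ k, (ins.foldl (fun d p => d.insert p.1 (p.2.toList.reverse ++ d.getD p.1 [])) d).getD k []
      = pvPend ins m k := by
  induction ins generalizing d m with
  | nil => exact h
  | cons p t ih =>
      intro k
      simp only [List.foldl_cons, pvPend]
      refine ih _ _ (fun j => ?_) k
      rw [PySem.Dict.getD_insert]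
      by_cases hj : j = p.1 <;> simp [hj, h]

-- the expansion pass produces pvExpand
theorem pvFoldB_expand (ds : List (Option Int × String)) (d : PySem.Dict Int (List Char))
    (m : Int → List Char) (out : List (Option Int × String)) (h : ∀ k, d.getD k [] = m k) :
    (ds.foldl
      (fun (st : PySem.Dict Int (List Char) × List (Option Int × String)) e =>
        let o := st.2 ++ [e]
        match e.1 with
        | none => (st.1, o)
        | some k =>
            if st.1.contains k then
              (st.1.erase k, o ++ (st.1.getD k []).map (fun c => ((none : Option Int), String.ofList [c])))
            else (st.1, o))
      (d, out)).2 = out ++ pvExpand ds m := by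
  induction ds generalizing d m out with
  | nil => simp [pvExpand]
  | cons e t ih =>
      obtain ⟨o, s⟩ := e
      cases o with
      | none =>
          simp only [List.foldl_cons, pvExpand]
          rw [ih _ _ _ h]; simp
      | some k =>
          simp only [List.foldl_cons, pvExpand]
          by_cases hc : d.contains k
          · simp only [hc, if_pos]
            rw [ih (d.erase k) (fun j => if j = k then [] else m j) _
                (fun j => by rw [pvDict_getD_erase]; by_cases hj : j = k <;> simp [hj, h])]
            simp [h, pvPh]
          · have hck : d.contains k = false := by simpa using hc
            have hmk : m k = [] := by rw [← h]; exact PySem.Dict.getD_of_not_contains _ _ hck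
            have hme : (fun j => if j = k then ([] : List Char) else m j) = m := by
              funext j; by_cases hj : j = k <;> simp [hj, hmk]
            simp only [hc, if_neg, Bool.false_eq_true, not_false_iff]
            rw [ih _ _ _ h]
            simp [hmk, pvPh, hme]

theorem apply_insert_alt_eq_expand (ds : List (Option Int × String)) (ins : List (Int × String)) :
    apply_insert_alt ds ins = pvExpand ds (pvPend ins (fun _ => [])) := by
  unfold apply_insert_alt
  exact pvFoldB_expand ds _ _ []
    (pvPendDict_agree ins PySem.Dict.empty (fun _ => []) (fun k => PySem.Dict.getD_empty k []))

-- ===== VERDICT (by name: the statement is the Claim_ definition above) =====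
theorem apply_insert_spec : Claim_equal_apply_insert := by
  intro deltas inserted _
  unfold Spec_apply_insert
  rw [apply_insert_eq_expand, apply_insert_alt_eq_expand]
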